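-- pv_equiv track=rewrite | github.com/kejrak/advent-of-code-2024 | 09-disk-fragmenter/python/main.py | move_towards_dots_part_one
-- ===== SOURCE A (Python) =====
-- def move_towards_dots_part_one(arr):
--     n = len(arr)
--     reverse_index = n - 1
--     new_arr = arr[:]
--
--     for i in range(n):
--         if new_arr[i] == '.':
--             while reverse_index > i and new_arr[reverse_index] == '.':
--                 reverse_index -= 1
--             if reverse_index > i:
--                 new_arr[i], new_arr[reverse_index] = new_arr[reverse_index], '.'
--                 reverse_index -= 1
--
--     return new_arr
-- ===== SOURCE B (Python) =====
-- def move_towards_dots_part_one(arr):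
--     n = len(arr)
--     m = n - arr.count('.')          # number of non-dot items
--     tail = [x for x in reversed(arr[m:]) if x != '.']
--     out = []
--     k = 0
--     for i in range(m):
--         if arr[i] != '.':
--             out.append(arr[i])
--         else:
--             out.append(tail[k])     # k < len(tail) always: dots in arr[:m] == non-dots in arr[m:]
--             k += 1
--     return out + ['.'] * (n - m)
-- ===== Notes on version B (the rewrite author's own statement) =====
-- stated objective: alternative
-- what changed: Replaces the in-place two-pointer swap loop (forward scan with a lazily decremented backward pointer) by a count-and-fill construction: count the non-dot items m, collect the non-dots of arr[m:] in reverse, then build the output left to right filling each dot from that list and padding with dots.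
import Mathlib
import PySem

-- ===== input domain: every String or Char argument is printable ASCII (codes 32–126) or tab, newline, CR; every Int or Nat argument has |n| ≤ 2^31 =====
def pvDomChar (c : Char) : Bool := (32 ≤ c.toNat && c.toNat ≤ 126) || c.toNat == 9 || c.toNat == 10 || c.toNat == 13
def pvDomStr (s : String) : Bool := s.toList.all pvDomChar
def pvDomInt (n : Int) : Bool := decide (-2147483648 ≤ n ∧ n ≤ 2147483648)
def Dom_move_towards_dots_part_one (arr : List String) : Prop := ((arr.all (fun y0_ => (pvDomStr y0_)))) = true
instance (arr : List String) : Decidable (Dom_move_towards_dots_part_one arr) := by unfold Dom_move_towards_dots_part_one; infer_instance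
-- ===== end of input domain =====

-- B compacts by counting: m non-dot items, fill dots of arr[:m] from the reversed non-dots of
-- arr[m:], pad with dots — an alternative (same cost) to A's in-place two-pointer swap loop.

-- ===== PORT A =====
-- the inner `while reverse_index > i and new_arr[reverse_index] == '.'` loop
def pvSkip (na : List String) (i : Nat) (r : Nat) : Nat :=
  if _h : i < r then
    if na.getD r "" = "." then pvSkip na i (r - 1) else r
  else r
termination_by r
decreasing_by omega

-- one iteration of A's `for i in range(n)` loop; state = (new_arr, reverse_index)
-- (Python's reverse_index is an int that is only read while > i ≥ 0, so Nat is exact here)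
def pvStepA (st : List String × Nat) (i : Nat) : List String × Nat :=
  if st.1.getD i "" = "." then
    let r' := pvSkip st.1 i st.2
    if i < r' then ((st.1.set i (st.1.getD r' "")).set r' ".", r' - 1)
    else (st.1, r')
  else st

def move_towards_dots_part_one (arr : List String) : List String :=
  ((List.range arr.length).foldl pvStepA (arr, arr.length - 1)).1

-- ===== PORT B =====
def move_towards_dots_part_one_alt (arr : List String) : List String :=
  let n := arr.length
  let m := n - PySem.List.count arr "."
  let tail := ((PySem.List.slice arr (some (m : Int)) none).reverse).filter (fun x => x != ".")
  let res := (List.range m).foldl (fun (st : List String × Nat) i =>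
      if arr.getD i "" != "." then (st.1 ++ [arr.getD i ""], st.2)
      else (st.1 ++ [tail.getD st.2 "."], st.2 + 1)) (([] : List String), 0)
  res.1 ++ List.replicate (n - m) "."
  -- tail.getD st.2 "." ports Source B's `tail[k]`: k < len(tail) on every input (dots in arr[:m]
  -- equal non-dots in arr[m:]), so the default is never taken and the port is exact.

-- ===== PRECONDITION & SPEC =====
def Spec_move_towards_dots_part_one (arr : List String) (out : List String) : Prop := out = move_towards_dots_part_one_alt arr
instance (arr : List String) (out : List String) : Decidable (Spec_move_towards_dots_part_one arr out) := by unfold Spec_move_towards_dots_part_one; infer_instance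

-- ===== CLAIM (what is proved, stated in full; the proofs are below) =====
def Claim_equal_move_towards_dots_part_one : Prop := ∀ (arr : List String), Dom_move_towards_dots_part_one arr → Spec_move_towards_dots_part_one arr (move_towards_dots_part_one arr)

-- ===== LEMMAS AND PROOFS =====

-- dots / non-dots counters
def pvDts (l : List String) : Nat := (l.filter (fun x => x == ".")).length
def pvNd (l : List String) : Nat := (l.filter (fun x => x != ".")).length

-- the reversed non-dot tail B reads from, and the left-to-right fill
def pvTail (arr : List String) : List String :=
  ((arr.drop (arr.length - pvDts arr)).reverse).filter (fun x => x != ".")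

def pvFill (t : List String) : List String → Nat → List String
  | [], _ => []
  | x :: xs, k => if x = "." then t.getD k "." :: pvFill t xs (k + 1) else x :: pvFill t xs k

-- loop invariant for A after i iterations: either frozen at the final value
-- (pointers have met), or the array is  fill(p) ++ untouched middle ++ dots.
def pvInv (arr : List String) (i : Nat) (st : List String × Nat) : Prop :=
  (st.1 = pvFill (pvTail arr) (arr.take (arr.length - pvDts arr)) 0 ++
      List.replicate (pvDts arr) "." ∧ st.2 ≤ i)
  ∨ (∃ p q s, arr = p ++ q ++ s ∧ p.length = i ∧ st.2 + 1 = i + q.length ∧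
      st.1 = pvFill (pvTail arr) p 0 ++ q ++ List.replicate s.length "." ∧ pvNd s = pvDts p)

lemma pvDts_append (l1 l2 : List String) : pvDts (l1 ++ l2) = pvDts l1 + pvDts l2 := by
  simp [pvDts, List.filter_append]

lemma pvNd_append (l1 l2 : List String) : pvNd (l1 ++ l2) = pvNd l1 + pvNd l2 := by
  simp [pvNd, List.filter_append]

lemma pvNd_add_pvDts (l : List String) : pvNd l + pvDts l = l.length := by
  induction l with
  | nil => rfl
  | cons x xs ih =>
    by_cases h : x = "." <;> simp [pvNd, pvDts, h] at * <;> omega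

lemma pvNd_replicate (j : Nat) : pvNd (List.replicate j ".") = 0 := by
  simp [pvNd]

lemma pvDts_replicate (j : Nat) : pvDts (List.replicate j ".") = j := by
  simp [pvDts]

lemma pvFill_length (t l : List String) (k : Nat) : (pvFill t l k).length = l.length := by
  induction l generalizing k with
  | nil => rfl
  | cons x xs ih => by_cases h : x = "." <;> simp [pvFill, h, ih]

lemma pvFill_append (t l1 l2 : List String) (k : Nat) :
    pvFill t (l1 ++ l2) k = pvFill t l1 k ++ pvFill t l2 (k + pvDts l1) := by
  induction l1 generalizing k with
  | nil => simp [pvFill, pvDts]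
  | cons x xs ih =>
    by_cases h : x = "."
    · simp [pvFill, h, ih, pvDts]; ring_nf
    · simp [pvFill, h, ih, pvDts]

-- every list is all dots or splits as u ++ y :: (trailing dots), y not a dot
lemma pvDecomp (l : List String) :
    l = List.replicate l.length "." ∨
      ∃ u y j, l = u ++ y :: List.replicate j "." ∧ ¬(y = ".") := by
  induction l with
  | nil => left; rfl
  | cons x xs ih =>
    rcases ih with h | ⟨u, y, j, hu, hy⟩
    · by_cases hx : x = "."
      · left; simp [hx, List.replicate_succ, ← h]
      · right; exact ⟨[], x, xs.length, by simp [← h], hx⟩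
    · right; exact ⟨x :: u, y, j, by simp [hu], hy⟩

lemma pvSkip_spec1 (c : List String) (y : String) (J : Nat) (hy : ¬(y = "."))
    (i : Nat) (hi : i < c.length) :
    ∀ j, j ≤ J → pvSkip (c ++ y :: List.replicate J ".") i (c.length + j) = c.length := by
  intro j
  induction j with
  | zero =>
    intro _
    rw [pvSkip]
    simp only [Nat.add_zero]
    rw [List.getD_append_right c (y :: List.replicate J ".") "" c.length (Nat.le_refl _)]
    simp [hi, hy]
  | succ j ih =>
    intro hj
    rw [pvSkip]
    have h1 : i < c.length + (j + 1) := by omega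
    have h2 : (c ++ y :: List.replicate J ".").getD (c.length + (j + 1)) "" = "." := by
      rw [List.getD_append_right c _ "" _ (by omega)]
      have : c.length + (j + 1) - c.length = j + 1 := by omega
      rw [this]
      simp [List.getD_eq_getElem?_getD]
      rw [List.getElem?_replicate]
      simp [show j < J by omega]
    simp only [h1, dif_pos, h2, if_pos]
    have : c.length + (j + 1) - 1 = c.length + j := by omega
    rw [this]
    exact ih (by omega)

lemma pvSkip_spec2 (c : List String) (J : Nat) (i : Nat) (hc : c.length = i + 1) :
    ∀ j, j ≤ J → pvSkip (c ++ List.replicate J ".") i (i + j) = i := by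
  intro j
  induction j with
  | zero => rw [pvSkip]; simp
  | succ j ih =>
    rw [pvSkip]
    intro hj
    have h1 : i < i + (j + 1) := by omega
    have h2 : (c ++ List.replicate J ".").getD (i + (j + 1)) "" = "." := by
      rw [List.getD_append_right c _ "" _ (by omega)]
      simp [List.getD_eq_getElem?_getD]
      rw [List.getElem?_replicate]
      simp [show i + (j + 1) - c.length < J by omega]
    simp only [h1, dif_pos, h2, if_pos]
    have : i + (j + 1) - 1 = i + j := by omega
    rw [this]
    exact ih (by omega)

lemma pvSet_append (l1 l2 : List String) (x y : String) :
    (l1 ++ x :: l2).set l1.length y = l1 ++ y :: l2 := by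
  induction l1 with
  | nil => simp
  | cons a t ih => simp [ih]

-- B's tail read: with arr = P ++ y :: s, y non-dot, pvNd s = d, d + 1 ≤ pvDts P,
-- the d-th element of pvTail arr is y.
lemma pvTailGet (arr P s : List String) (y : String) (d : Nat) (hy : ¬(y = "."))
    (hsplit : arr = P ++ y :: s) (hd : pvNd s = d) (hP : d + 1 ≤ pvDts P) :
    (pvTail arr).getD d "." = y := by
  have len : arr.length = P.length + 1 + s.length := by
    subst hsplit; simp; omega
  have hD : pvDts arr = pvDts P + pvDts s := by
    subst hsplit
    rw [pvDts_append]
    simp [pvDts, hy]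
  have hnds := pvNd_add_pvDts s
  set m := arr.length - pvDts arr with hm
  have hmle : m ≤ P.length := by omega
  have hdrop : arr.drop m = P.drop m ++ y :: s := by
    conv_lhs => rw [hsplit]
    exact List.drop_append_of_le_length hmle
  have hlen : ((s.reverse.filter (fun x => x != ".")).length) = d := by
    rw [List.filter_reverse, List.length_reverse]
    exact hd
  unfold pvTail
  rw [← hm, hdrop, List.reverse_append, List.reverse_cons, List.filter_append, List.filter_append]
  have hyf : List.filter (fun x => x != ".") [y] = [y] := by simp [hy]
  rw [hyf, List.append_assoc]
  rw [List.getD_append_right _ _ "." d (by omega)]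
  rw [hlen]
  simp

lemma pvGetD_mid (A : List String) (x : String) (rest : List String) (i : Nat)
    (hA : A.length = i) : (A ++ x :: rest).getD i "" = x := by
  subst hA
  rw [List.getD_append_right A _ "" _ (Nat.le_refl _)]
  simp

-- the invariant is preserved by one iteration of A's loop
lemma pvStep_preserve (arr : List String) (i : Nat) (st : List String × Nat)
    (hi : i < arr.length) (h : pvInv arr i st) : pvInv arr (i + 1) (pvStepA st i) := by
  obtain ⟨na, r⟩ := st
  rcases h with ⟨hna, hr⟩ | ⟨p, q, s, harr, hp, hr, hna, hcnt⟩
  · -- frozen: nothing changes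
    have hskip : pvSkip na i r = r := by rw [pvSkip]; simp [show ¬ i < r by omega]
    have hstep : pvStepA (na, r) i = (na, r) := by
      by_cases hdot : na.getD i "" = "."
      · unfold pvStepA; dsimp only
        rw [if_pos hdot, hskip, if_neg (show ¬ i < r by omega)]
      · unfold pvStepA; dsimp only
        rw [if_neg hdot]
    rw [hstep]
    exact Or.inl ⟨hna, by omega⟩
  · have hA : (pvFill (pvTail arr) p 0).length = i := by rw [pvFill_length]; exact hp
    have hnds := pvNd_add_pvDts s
    have hndp := pvNd_add_pvDts p
    match q, hr, hna with
    | [], hr, hna =>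
      dsimp only at hr hna
      simp only [List.length_nil, Nat.add_zero, List.append_nil] at hr hna
      -- pointers have met: new_arr[i] is in the dot zone, nothing changes, final value reached
      have hslen : i < i + s.length := by
        have : arr.length = i + s.length := by rw [harr]; simp [hp]
        omega
      have hdot : na.getD i "" = "." := by
        rw [hna]
        rw [List.getD_append_right _ _ "" _ (by omega)]
        simp [List.getD_eq_getElem?_getD, hA, show 0 < s.length by omega]
      have hskip : pvSkip na i r = r := by rw [pvSkip]; simp [show ¬ i < r by omega]
      have hstep : pvStepA (na, r) i = (na, r) := by
        unfold pvStepA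
        dsimp only
        rw [if_pos hdot, hskip, if_neg (show ¬ i < r by omega)]
      rw [hstep]
      left
      have hdts : pvDts arr = s.length := by
        have h1 : pvDts arr = pvDts p + pvDts s := by rw [harr]; simp [pvDts_append]
        omega
      have hm : arr.length - pvDts arr = i := by
        have : arr.length = i + s.length := by rw [harr]; simp [hp]
        omega
      refine ⟨?_, by omega⟩
      rw [hm, hdts, hna]
      have : arr.take i = p := by
        rw [harr]; simp only [List.append_nil]; exact List.take_left' hp
      rw [this]
    | x :: q', hr, hna =>
      dsimp only at hr hna
      simp only [List.length_cons] at hr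
      have hgx : na.getD i "" = x := by
        rw [hna, List.append_assoc, List.cons_append]
        exact pvGetD_mid _ x _ i hA
      by_cases hx : x = "."
      · -- new_arr[i] == '.': scan back for a non-dot
        rcases pvDecomp q' with hq' | ⟨u, y, jv, hq', hy⟩
        · -- everything right of i is dots: the while loop walks down to i, no swap, frozen
          obtain ⟨J, hq2⟩ : ∃ k, q' = List.replicate k "." := ⟨q'.length, hq'⟩
          have hJl : q'.length = J := by rw [hq2]; simp
          have hna2 : na = (pvFill (pvTail arr) p 0 ++ ["."]) ++
              List.replicate (J + s.length) "." := by
            rw [hna, hx]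
            conv_lhs => rw [hq2]
            rw [List.replicate_add]
            simp
          have hrr : r = i + J := by omega
          have hcond : na.getD i "" = "." := by rw [hgx]; exact hx
          have hskip : pvSkip na i r = i := by
            rw [hna2, hrr]
            exact pvSkip_spec2 _ (J + s.length) i (by simp [hA]) J (by omega)
          have hstep : pvStepA (na, r) i = (na, i) := by
            unfold pvStepA
            dsimp only
            rw [if_pos hcond, hskip, if_neg (lt_irrefl i)]
          rw [hstep]
          left
          have hrep : ("." :: List.replicate J "." : List String) = List.replicate (J + 1) "." := by
            rw [List.replicate_succ]
          have hdq : pvDts (x :: q') = 1 + J := by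
            rw [hx]; conv_lhs => rw [hq2]
            rw [hrep, pvDts_replicate]
            omega
          have h1 : pvDts arr = pvDts p + (1 + J) + pvDts s := by
            rw [harr, pvDts_append, pvDts_append, hdq]
          have hlen : arr.length = i + (1 + J) + s.length := by
            rw [harr]; simp [hp]; omega
          have hm : arr.length - pvDts arr = i := by omega
          have hdall : pvDts arr = (J + s.length) + 1 := by omega
          refine ⟨?_, by omega⟩
          rw [hm, hdall, hna2]
          have : arr.take i = p := by
            rw [harr, List.append_assoc]; exact List.take_left' hp
          rw [this, List.replicate_succ]
          simp
        · -- a non-dot y sits above the dots: the while loop stops at y, swap fires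
          set t := pvTail arr with ht
          set A := pvFill t p 0 with hAdef
          set c := A ++ "." :: u with hcdef
          have hclen : c.length = i + 1 + u.length := by simp [hcdef, hA]; omega
          have hna2 : na = c ++ y :: List.replicate (jv + s.length) "." := by
            rw [hna, hx]
            conv_lhs => rw [hq']
            rw [List.replicate_add]
            simp [hcdef]
          have hql : q'.length = u.length + (1 + jv) := by rw [hq']; simp; omega
          have hrr : r = c.length + jv := by rw [hclen]; omega
          have hskip : pvSkip na i r = c.length := by
            rw [hna2, hrr]
            exact pvSkip_spec1 c y (jv + s.length) hy i (by omega) jv (by omega)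
          have hgr : na.getD c.length "" = y := by rw [hna2]; exact pvGetD_mid _ y _ _ rfl
          have hic : i < c.length := by omega
          have hset : (na.set i (na.getD c.length "")).set c.length "." =
              (A ++ y :: u) ++ "." :: List.replicate (jv + s.length) "." := by
            rw [hgr]
            have s1 : na.set i y = (A ++ y :: u) ++ y :: List.replicate (jv + s.length) "." := by
              rw [hna2, hcdef]
              have : A ++ "." :: u ++ y :: List.replicate (jv + s.length) "." =
                  A ++ "." :: (u ++ y :: List.replicate (jv + s.length) ".") := by simp
              rw [this, ← hA, pvSet_append]
              simp
            rw [s1]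
            have : (A ++ y :: u).length = c.length := by simp [hcdef]
            rw [← this, pvSet_append]
          have hcond : na.getD i "" = "." := by rw [hgx]; exact hx
          have hstep : pvStepA (na, r) i =
              ((A ++ y :: u) ++ "." :: List.replicate (jv + s.length) ".", c.length - 1) := by
            unfold pvStepA
            dsimp only
            rw [if_pos hcond, hskip, if_pos hic, hset]
          rw [hstep]
          right
          -- the swapped-in y is exactly B's next tail element
          have hyfill : t.getD (pvDts p) "." = y := by
            apply pvTailGet arr (p ++ "." :: u) (List.replicate jv "." ++ s) y (pvDts p) hy
            · rw [harr, hx]; conv_lhs => rw [hq']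
              simp only [List.append_assoc, List.cons_append]
            · rw [pvNd_append, pvNd_replicate]; omega
            · rw [pvDts_append]
              have : pvDts ["."] = 1 := by simp [pvDts]
              have h2 : pvDts ("." :: u) = 1 + pvDts u := by
                simp [pvDts]; omega
              omega
          refine ⟨p ++ ["."], u, y :: (List.replicate jv "." ++ s), ?_, by simp [hp], ?_, ?_, ?_⟩
          · rw [harr, hx]; conv_lhs => rw [hq']
            simp only [List.append_assoc, List.cons_append, List.nil_append]
          · simp [hclen]; omega
          · have h5 : pvFill t ["."] (0 + pvDts p) = [y] := by
              rw [pvFill, pvFill, if_pos rfl, Nat.zero_add, hyfill]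
            have hfill : pvFill t (p ++ ["."]) 0 = A ++ [y] := by
              rw [pvFill_append, h5, hAdef]
            have hlen2 : (y :: (List.replicate jv "." ++ s)).length = (jv + s.length) + 1 := by
              simp
            rw [hfill, hlen2, List.replicate_succ]
            simp
          · have e1 : pvNd (y :: (List.replicate jv "." ++ s)) =
                pvNd [y] + (pvNd (List.replicate jv ".") + pvNd s) := by
              rw [show (y :: (List.replicate jv "." ++ s)) = [y] ++ (List.replicate jv "." ++ s)
                    from rfl, pvNd_append, pvNd_append]
            have e2 : pvNd [y] = 1 := by simp [pvNd, hy]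
            have e3 : pvDts ["."] = 1 := by simp [pvDts]
            rw [e1, e2, pvNd_replicate, pvDts_append, e3]
            omega
      · -- new_arr[i] is already a non-dot: nothing changes, it joins the finished prefix
        have hcond : ¬ (na.getD i "" = ".") := by rw [hgx]; exact hx
        have hstep : pvStepA (na, r) i = (na, r) := by
          unfold pvStepA
          dsimp only
          rw [if_neg hcond]
        rw [hstep]
        right
        refine ⟨p ++ [x], q', s, ?_, by simp [hp], ?_, ?_, ?_⟩
        · rw [harr]; simp
        · simp; omega
        · rw [hna, pvFill_append]
          simp [pvFill, hx]
        · rw [pvDts_append]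
          have : pvDts [x] = 0 := by simp [pvDts, hx]
          omega

lemma pvMain (arr : List String) (hn : 0 < arr.length) :
    ∀ i, i ≤ arr.length →
      pvInv arr i ((List.range i).foldl pvStepA (arr, arr.length - 1)) := by
  intro i
  induction i with
  | zero =>
    intro _
    right
    exact ⟨[], arr, [], by simp, rfl, by simp; omega, by simp [pvFill], by simp [pvNd, pvDts]⟩
  | succ i ih =>
    intro hle
    rw [List.range_succ, List.foldl_append, List.foldl_cons, List.foldl_nil]
    exact pvStep_preserve arr i _ (by omega) (ih (by omega))

-- B's fold builds pvFill of the prefix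
lemma pvAltFold (arr : List String) (t : List String) :
    ∀ i, i ≤ arr.length - pvDts arr →
      (List.range i).foldl (fun (st : List String × Nat) j =>
        if arr.getD j "" != "." then (st.1 ++ [arr.getD j ""], st.2)
        else (st.1 ++ [t.getD st.2 "."], st.2 + 1)) (([] : List String), 0)
      = (pvFill t (arr.take i) 0, pvDts (arr.take i)) := by
  intro i
  induction i with
  | zero => intro _; simp [pvFill, pvDts]
  | succ i ih =>
    intro h
    have hil : i < arr.length := by omega
    rw [List.range_succ, List.foldl_append, List.foldl_cons, List.foldl_nil, ih (by omega)]
    generalize hg : arr.getD i "" = g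
    have htake : arr.take (i + 1) = arr.take i ++ [g] := by
      rw [List.take_add_one, List.getElem?_eq_getElem hil, ← hg]
      simp [List.getD_eq_getElem?_getD, List.getElem?_eq_getElem hil]
    by_cases hx : g = "."
    · have hf : pvFill t (arr.take (i + 1)) 0 = pvFill t (arr.take i) 0 ++
          [t.getD (pvDts (arr.take i)) "."] := by
        rw [htake, pvFill_append]
        simp [pvFill, hx]
      have hone : pvDts [g] = 1 := by rw [hx]; simp [pvDts]
      have hdts2 : pvDts (arr.take (i + 1)) = pvDts (arr.take i) + 1 := by
        rw [htake, pvDts_append, hone]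
      simp [hx, hf, hdts2]
    · have hf : pvFill t (arr.take (i + 1)) 0 = pvFill t (arr.take i) 0 ++ [g] := by
        rw [htake, pvFill_append]
        simp [pvFill, hx]
      have hzero : pvDts [g] = 0 := by simp [pvDts, hx]
      have hdts2 : pvDts (arr.take (i + 1)) = pvDts (arr.take i) := by
        rw [htake, pvDts_append, hzero]
        omega
      simp [hx, hf, hdts2]


lemma pvAlt_eq (arr : List String) :
    move_towards_dots_part_one_alt arr =
      pvFill (pvTail arr) (arr.take (arr.length - pvDts arr)) 0 ++
        List.replicate (pvDts arr) "." := by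
  have hc : PySem.List.count arr "." = pvDts arr := by
    rw [PySem.List.count_eq]; exact List.count_eq_length_filter
  have hdle : pvDts arr ≤ arr.length := by
    have := pvNd_add_pvDts arr; omega
  unfold move_towards_dots_part_one_alt
  dsimp only
  rw [hc, PySem.List.slice_from_natCast]
  rw [pvAltFold arr _ (arr.length - pvDts arr) (Nat.le_refl _)]
  have hm : (arr.take (arr.length - pvDts arr)).length = arr.length - pvDts arr := by
    simp
  rw [show arr.length - (arr.length - pvDts arr) = pvDts arr from by omega]
  rfl

-- ===== VERDICT (by name: the statement is the Claim_ definition above) =====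
theorem move_towards_dots_part_one_spec : Claim_equal_move_towards_dots_part_one := by
  intro arr _
  unfold Spec_move_towards_dots_part_one
  rw [pvAlt_eq]
  by_cases hn : arr.length = 0
  · have : arr = [] := List.eq_nil_of_length_eq_zero hn
    subst this
    simp [move_towards_dots_part_one, pvFill, pvDts]
  · have hmain := pvMain arr (by omega) arr.length (Nat.le_refl _)
    unfold move_towards_dots_part_one
    rcases hmain with ⟨hna, _⟩ | ⟨p, q, s, harr, hp, hr, hna, hcnt⟩
    · exact hna
    · have hlen := congrArg List.length harr
      simp at hlen
      have hq : q = [] := List.eq_nil_of_length_eq_zero (by omega)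
      have hs : s = [] := List.eq_nil_of_length_eq_zero (by omega)
      subst hq hs
      have hpe : arr = p := by simpa using harr
      subst hpe
      simp [pvNd] at hcnt
      simp at hna
      rw [show pvDts arr = 0 from hcnt.symm]
      simpa using hna
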